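-- pv_equiv track=rewrite | github.com/SatriaMilan/Learn_Pyhton | modul 5/Kegiatan3.py | kelompokkan_ke_interval
-- ===== SOURCE A (Python) =====
-- def kelompokkan_ke_interval(data, interval_size):
--     intervals = {}
--     for tinggi in data:
--         lower_bound = (tinggi // interval_size) * interval_size
--         upper_bound = lower_bound + interval_size
--         interval = f"{lower_bound}-{upper_bound}"
--         if interval in intervals:
--             intervals[interval] += 1
--         else:
--             intervals[interval] = 1
--     return intervals
-- ===== SOURCE B (Python) =====
-- def kelompokkan_ke_interval(data, interval_size):
--     # Recursive partition: take the first key, count it by removing all its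
--     # occurrences at once, then recurse on the remainder (no incremental dict
--     # counting; each round handles one whole interval group).
--     def key(t):
--         lower = (t // interval_size) * interval_size
--         return f"{lower}-{lower + interval_size}"
--
--     def group(keys):
--         if not keys:
--             return {}
--         k = keys[0]
--         rest = [x for x in keys if x != k]
--         out = {k: len(keys) - len(rest)}
--         out.update(group(rest))
--         return out
--
--     return group([key(t) for t in data])
-- ===== Notes on version B (the rewrite author's own statement) =====
-- stated objective: alternative
-- what changed: Replaces A's single incremental dict-counting pass with a recursive partition: map values to keys once, then repeatedly take the first key, count its whole group by filtering all its occurrences out at once, and recurse on the remainder.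
import Mathlib
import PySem

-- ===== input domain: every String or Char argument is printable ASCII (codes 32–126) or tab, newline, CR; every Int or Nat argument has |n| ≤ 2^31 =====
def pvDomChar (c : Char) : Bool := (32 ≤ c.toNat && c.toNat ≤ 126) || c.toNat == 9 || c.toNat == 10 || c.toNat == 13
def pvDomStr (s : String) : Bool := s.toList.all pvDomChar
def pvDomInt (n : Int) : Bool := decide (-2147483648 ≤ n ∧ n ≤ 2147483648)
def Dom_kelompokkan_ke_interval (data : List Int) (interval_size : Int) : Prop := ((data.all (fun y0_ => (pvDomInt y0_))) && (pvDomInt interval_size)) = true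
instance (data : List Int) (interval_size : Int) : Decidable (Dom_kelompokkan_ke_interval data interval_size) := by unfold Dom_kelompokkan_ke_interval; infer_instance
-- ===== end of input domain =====

-- B replaces A's incremental dict-counting pass with a recursive partition (take first key, filter its whole group out, recurse) — alternative decomposition, same results.
-- ===== PORT A =====
def kelompokkan_ke_interval (data : List Int) (interval_size : Int) : List (String × Int) :=
  (data.foldl (fun intervals tinggi =>
      let lower_bound := PySem.Int.floordiv tinggi interval_size * interval_size
      let upper_bound := lower_bound + interval_size
      let interval := PySem.Int.toStr lower_bound ++ "-" ++ PySem.Int.toStr upper_bound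
      if intervals.contains interval then
        intervals.insert interval (intervals.getD interval 0 + 1)
      else
        intervals.insert interval 1)
    PySem.Dict.empty).items

-- ===== PORT B =====
-- B's inner recursion `group`: dict literal {k: c} followed by update with keys ≠ k = cons on the assoc list.
def pvGroup : List String → List (String × Int)
  | [] => []
  | k :: t =>
      let rest := (k :: t).filter (fun x => x ≠ k)
      (k, ((k :: t).length : Int) - (rest.length : Int)) :: pvGroup rest
  termination_by ks => ks.length
  decreasing_by
    have h : ((k :: t).filter (fun x => x ≠ k)).length ≤ t.length := by
      rw [List.filter_cons]
      simp only [ne_eq, not_true, decide_false]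
      exact t.length_filter_le _
    simpa using Nat.lt_succ_of_le h

def kelompokkan_ke_interval_alt (data : List Int) (interval_size : Int) : List (String × Int) :=
  pvGroup (data.map (fun t =>
    let lower := PySem.Int.floordiv t interval_size * interval_size
    PySem.Int.toStr lower ++ "-" ++ PySem.Int.toStr (lower + interval_size)))

-- ===== PRECONDITION & SPEC =====
-- Pre_ excludes exactly interval_size = 0 with nonempty data, where Python A raises ZeroDivisionError.
def Pre_kelompokkan_ke_interval (data : List Int) (interval_size : Int) : Prop := data = [] ∨ interval_size ≠ 0
instance (data : List Int) (interval_size : Int) : Decidable (Pre_kelompokkan_ke_interval data interval_size) := by unfold Pre_kelompokkan_ke_interval; infer_instance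
def pvWitness_kelompokkan_ke_interval : List Int × Int := ([160, 172, 165, 172], 10)
def Spec_kelompokkan_ke_interval (data : List Int) (interval_size : Int) (out : List (String × Int)) : Prop := out = kelompokkan_ke_interval_alt data interval_size
instance (data : List Int) (interval_size : Int) (out : List (String × Int)) : Decidable (Spec_kelompokkan_ke_interval data interval_size out) := by unfold Spec_kelompokkan_ke_interval; infer_instance

-- ===== CLAIM =====
def Claim_equal_kelompokkan_ke_interval : Prop := ∀ (data : List Int) (interval_size : Int), Dom_kelompokkan_ke_interval data interval_size → Pre_kelompokkan_ke_interval data interval_size → Spec_kelompokkan_ke_interval data interval_size (kelompokkan_ke_interval data interval_size)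

-- ===== LEMMAS AND PROOFS =====

-- A's fold step equals the counter step
lemma pvA_eq_counter (l : List String) :
    l.foldl (fun d k =>
        if d.contains k then d.insert k (d.getD k 0 + 1) else d.insert k 1)
      PySem.Dict.empty = PySem.Dict.counter l := by
  rw [← PySem.Dict.foldl_insert_getD_add_one_eq_counter]
  congr 1
  funext d k
  by_cases h : d.contains k
  · simp [h]
  · simp [h, PySem.Dict.getD_of_not_contains d 0 (by simpa using h)]

-- folding Set.add with an extra head k that no later element equals
lemma pvFoldl_add_head (k : String) :
    ∀ (l : List String) (s : PySem.Set String), (∀ x ∈ l, x ≠ k) →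
      l.foldl PySem.Set.add (k :: s) = k :: l.foldl PySem.Set.add s := by
  intro l
  induction l with
  | nil => intro s _; rfl
  | cons a l ih =>
    intro s hne
    have hak : a ≠ k := hne a List.mem_cons_self
    have hstep : PySem.Set.add (k :: s) a = k :: PySem.Set.add s a := by
      rw [PySem.Set.add_eq_ite, PySem.Set.add_eq_ite]
      by_cases h : a ∈ s
      · rw [if_pos (List.mem_cons_of_mem k h), if_pos h]
      · rw [if_neg (by simp [hak, h]), if_neg h]
        simp
    rw [List.foldl_cons, List.foldl_cons, hstep]
    exact ih (PySem.Set.add s a) (fun x hx => hne x (List.mem_cons_of_mem a hx))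

-- adding elements equal to a member of the accumulator is a no-op, so they may be filtered away
lemma pvFoldl_add_filter (k : String) :
    ∀ (l : List String) (s : PySem.Set String), k ∈ s →
      l.foldl PySem.Set.add s = (l.filter (fun x => x ≠ k)).foldl PySem.Set.add s := by
  intro l
  induction l with
  | nil => intro s _; rfl
  | cons a l ih =>
    intro s hk
    by_cases hak : a = k
    · subst hak
      have : PySem.Set.add s a = s := PySem.Set.add_of_mem hk
      simp only [List.filter_cons, ne_eq, not_true, decide_false]
      rw [if_neg (by simp), List.foldl_cons, this]
      exact ih s hk
    · simp only [List.filter_cons]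
      rw [if_pos (by simp [hak]), List.foldl_cons, List.foldl_cons]
      exact ih (PySem.Set.add s a) ((PySem.Set.mem_add s a k).mpr (Or.inl hk))

-- ofList of a cons: head first, then ofList of the tail with the head filtered out
lemma pvOfList_cons_filter (k : String) (t : List String) :
    PySem.Set.ofList (k :: t) = k :: PySem.Set.ofList (t.filter (fun x => x ≠ k)) := by
  have h2 : PySem.Set.ofList (k :: t) = t.foldl PySem.Set.add [k] := by
    rw [PySem.Set.ofList_eq_foldl, List.foldl_cons]; rfl
  rw [h2, pvFoldl_add_filter k t [k] (by simp),
    show ([k] : PySem.Set String) = (k :: ([] : PySem.Set String)) from rfl,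
    pvFoldl_add_head k (t.filter (fun x => x ≠ k)) []
      (fun x hx => by simpa using (List.of_mem_filter hx)),
    PySem.Set.ofList_eq_foldl]

-- filtering out k then adding back its count restores the length
lemma pvLen_filter_count (k : String) :
    ∀ (l : List String), (l.filter (fun x => x ≠ k)).length + l.count k = l.length := by
  intro l
  induction l with
  | nil => rfl
  | cons a l ih =>
    simp only [ne_eq, decide_not] at ih ⊢
    simp only [List.filter_cons, List.count_cons]
    by_cases h : a = k
    · subst h; simp; omega
    · simp [h]; omega

-- count of the head equals length minus the ≠-filtered length
lemma pvCount_head (k : String) (t : List String) :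
    ((k :: t).length : Int) - (((k :: t).filter (fun x => x ≠ k)).length : Int)
      = ((k :: t).count k : Int) := by
  have h := pvLen_filter_count k (k :: t)
  omega

-- main lemma: B's recursion computes Counter's items
lemma pvGroup_eq_counter_items : ∀ (K : List String),
    pvGroup K = (PySem.Set.ofList K).map (fun k => (k, (K.count k : Int))) := by
  intro K
  induction K using pvGroup.induct with
  | case1 => simp only [pvGroup]; rfl
  | case2 k t rest ih =>
    rw [pvGroup]
    have hrest : rest = t.filter (fun x => x ≠ k) := by
      show (k :: t).filter (fun x => x ≠ k) = _
      simp
    rw [ih, pvOfList_cons_filter k t, List.map_cons, pvCount_head k t, ← hrest]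
    congr 1
    apply List.map_congr_left
    intro x hx
    have hxk : x ≠ k := by
      have hmem : x ∈ rest := (PySem.Set.mem_ofList rest x).mp hx
      rw [hrest] at hmem
      simpa using (List.of_mem_filter hmem)
    have hc : rest.count x = (k :: t).count x := by
      rw [hrest, List.count_filter (by simp [hxk]), List.count_cons]
      simp [Ne.symm hxk]
    rw [hc]

-- ===== VERDICT =====
theorem kelompokkan_ke_interval_spec : Claim_equal_kelompokkan_ke_interval := by
  intro data s _ _
  unfold Spec_kelompokkan_ke_interval kelompokkan_ke_interval kelompokkan_ke_interval_alt
  set key := fun t : Int =>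
    let lower := PySem.Int.floordiv t s * s
    PySem.Int.toStr lower ++ "-" ++ PySem.Int.toStr (lower + s) with hkey
  have hA : data.foldl (fun intervals tinggi =>
      let lower_bound := PySem.Int.floordiv tinggi s * s
      let upper_bound := lower_bound + s
      let interval := PySem.Int.toStr lower_bound ++ "-" ++ PySem.Int.toStr upper_bound
      if intervals.contains interval then
        intervals.insert interval (intervals.getD interval 0 + 1)
      else
        intervals.insert interval 1) PySem.Dict.empty
      = PySem.Dict.counter (data.map key) := by
    rw [← pvA_eq_counter (data.map key), List.foldl_map]
  rw [hA, PySem.Dict.items_counter, pvGroup_eq_counter_items]
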